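-- pv_equiv track=rewrite | github.com/mizadri/big-data | ID3/ID3.py | contarClasesPorValorDeAtributo
-- ===== SOURCE A (Python) =====
-- def contarClasesPorValorDeAtributo(datos):
-- 	attr_val_classes = {}
--
-- 	for row in datos:
-- 		# Creamos un diccionario por cada atributo menos class (cabecera CSV)
-- 		if not attr_val_classes:
-- 			for attr in row:
-- 				if attr != 'class':
-- 					attr_val_classes[attr] = {}
--
-- 		# Calculamos el numero de veces que se repite una clase para cada valor de un atributo
-- 		for attr in attr_val_classes:
-- 			if row[attr] not in attr_val_classes[attr]:
-- 				attr_val_classes[attr][row[attr]] = {row['class']: 1}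
-- 			else:
-- 				if row['class'] in attr_val_classes[attr][row[attr]]:
-- 					attr_val_classes[attr][row[attr]][row['class']] += 1
-- 				else:
-- 					attr_val_classes[attr][row[attr]][row['class']] = 1
--
-- 	return attr_val_classes
-- ===== SOURCE B (Python) =====
-- def contarClasesPorValorDeAtributo(datos):
--     # Attribute-major counting: the first row fixes the attribute schema, then
--     # one independent counting pass over the rows per attribute.
--     result = {}
--     if not datos:
--         return result
--     for attr in datos[0]:
--         if attr == 'class':
--             continue
--         counts = {}
--         for row in datos:
--             val, cls = row[attr], row['class']
--             inner = counts.setdefault(val, {})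
--             inner[cls] = inner.get(cls, 0) + 1
--         result[attr] = counts
--     return result
-- ===== Notes on version B (the rewrite author's own statement) =====
-- stated objective: alternative
-- what changed: A builds the nested dict in one row-major pass with a lazy initialization check and a three-way branch per cell; B takes the attribute schema from the first row and makes one independent counting pass over the rows per attribute with setdefault/get. …
-- outside the precondition, e.g. on contarClasesPorValorDeAtributo([{'class': 'x'}, {'a': '1', 'class': 'x'}]): A returns {'a': {'1': {'x': 1}}}, B returns {}
import Mathlib
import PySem

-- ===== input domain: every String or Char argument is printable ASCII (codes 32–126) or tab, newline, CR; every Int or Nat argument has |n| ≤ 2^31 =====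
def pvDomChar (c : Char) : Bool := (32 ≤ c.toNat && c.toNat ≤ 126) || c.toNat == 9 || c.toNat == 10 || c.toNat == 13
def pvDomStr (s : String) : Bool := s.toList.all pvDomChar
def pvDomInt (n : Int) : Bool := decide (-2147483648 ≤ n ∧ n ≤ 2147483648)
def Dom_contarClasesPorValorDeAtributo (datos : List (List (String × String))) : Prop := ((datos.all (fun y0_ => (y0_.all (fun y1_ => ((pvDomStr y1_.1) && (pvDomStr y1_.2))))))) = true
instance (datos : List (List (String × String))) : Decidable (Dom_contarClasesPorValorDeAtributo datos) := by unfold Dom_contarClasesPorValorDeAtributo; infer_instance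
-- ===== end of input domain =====

-- B replaces A's single row-major pass over a lazily initialized nested dict by taking the
-- attribute schema from the first row and counting attribute-major, one pass per attribute
-- (alternative decomposition, same asymptotic cost).

-- ===== PORT A =====
-- A's per-attribute update of the inner {value: {class: count}} dict for one row
-- (the body of A's 'for attr in attr_val_classes' loop).
def pvF (attr : String) (row : List (String × String)) (inner : PySem.Dict String (PySem.Dict String Int)) :
    PySem.Dict String (PySem.Dict String Int) :=
  let v := (PySem.Dict.mk row).getD attr ""          -- row[attr]   (present on Pre_ inputs)
  let c := (PySem.Dict.mk row).getD "class" ""       -- row['class'] (present on Pre_ inputs)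
  if inner.contains v = false then
    inner.insert v (PySem.Dict.empty.insert c 1)
  else
    let cc := inner.getD v PySem.Dict.empty
    if cc.contains c then inner.insert v (cc.insert c (cc.getD c 0 + 1))
    else inner.insert v (cc.insert c 1)

-- 'if not attr_val_classes: for attr in row: …' — initialization from the current row's keys
def pvInitA (acc : PySem.Dict String (PySem.Dict String (PySem.Dict String Int))) (row : List (String × String)) :
    PySem.Dict String (PySem.Dict String (PySem.Dict String Int)) :=
  row.foldl (fun a kv => if kv.1 != "class" then a.insert kv.1 PySem.Dict.empty else a) acc

-- 'for attr in attr_val_classes: …' — update every attribute's inner dict for this row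
def pvStepA (acc : PySem.Dict String (PySem.Dict String (PySem.Dict String Int))) (row : List (String × String)) :
    PySem.Dict String (PySem.Dict String (PySem.Dict String Int)) :=
  acc.keys.foldl (fun acc attr => acc.insert attr (pvF attr row (acc.getD attr PySem.Dict.empty))) acc

def contarClasesPorValorDeAtributo (datos : List (List (String × String))) : List (String × List (String × List (String × Int))) :=
  (datos.foldl
      (fun acc row => pvStepA (if acc.items.isEmpty then pvInitA acc row else acc) row)
      PySem.Dict.empty).items.map
    (fun p => (p.1, p.2.items.map (fun q => (q.1, q.2.items))))

-- ===== PORT B =====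
-- Source B's inner loop: count {value: {class: count}} for one attribute over all rows
def pvCountB (attr : String) (rows : List (List (String × String))) : PySem.Dict String (PySem.Dict String Int) :=
  rows.foldl
    (fun counts row =>
      let v := (PySem.Dict.mk row).getD attr ""      -- row[attr]
      let c := (PySem.Dict.mk row).getD "class" ""   -- row['class']
      let counts := if counts.contains v = false then counts.insert v PySem.Dict.empty else counts  -- counts.setdefault(val, {})
      let inner := counts.getD v PySem.Dict.empty
      counts.insert v (inner.insert c (inner.getD c 0 + 1)))   -- inner[cls] = inner.get(cls, 0) + 1
    PySem.Dict.empty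

def contarClasesPorValorDeAtributo_alt (datos : List (List (String × String))) : List (String × List (String × List (String × Int))) :=
  match datos with
  | [] => []                                          -- 'if not datos: return result'
  | row :: rest =>
    -- 'for attr in datos[0]: if attr == "class": continue; … result[attr] = counts'
    ((PySem.Dict.mk row).keys.foldl
        (fun res attr => if attr == "class" then res else res.insert attr (pvCountB attr (row :: rest)))
        PySem.Dict.empty).items.map
      (fun p => (p.1, p.2.items.map (fun q => (q.1, q.2.items))))

-- ===== PRECONDITION & SPEC =====
-- 'this row contributes no attribute' (all its keys are 'class')
def pvSoloClase (row : List (String × String)) : Bool := row.all (fun p => p.1 == "class")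

-- Pre_ excludes (a) inputs where a row lacks the key 'class' or one of the first row's attribute
-- keys: Python A raises KeyError there; (b) association lists in which a row has duplicate keys,
-- which cannot arise from a Python dict argument; and (c) the degenerate corner where the first
-- row carries only a 'class' key while a later row has attributes — there A's lazy initialization
-- counts from that later row while B's first-row schema yields {}, both defensible.
def Pre_contarClasesPorValorDeAtributo (datos : List (List (String × String))) : Prop :=
  (∀ row ∈ datos, (row.map Prod.fst).Nodup) ∧
  ((∀ row ∈ datos, pvSoloClase row = true) ∨
   (pvSoloClase (datos.headD []) = false ∧
    ∀ row ∈ datos, "class" ∈ row.map Prod.fst ∧ ∀ p ∈ datos.headD [], p.1 ∈ row.map Prod.fst))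

instance (datos : List (List (String × String))) : Decidable (Pre_contarClasesPorValorDeAtributo datos) := by
  unfold Pre_contarClasesPorValorDeAtributo; infer_instance

def pvWitness_contarClasesPorValorDeAtributo : (List (List (String × String))) :=
  [[("a", "1"), ("class", "x")], [("a", "2"), ("class", "x")], [("a", "1"), ("class", "y")]]

def Spec_contarClasesPorValorDeAtributo (datos : List (List (String × String))) (out : List (String × List (String × List (String × Int)))) : Prop := out = contarClasesPorValorDeAtributo_alt datos
instance (datos : List (List (String × String))) (out : List (String × List (String × List (String × Int)))) : Decidable (Spec_contarClasesPorValorDeAtributo datos out) := by unfold Spec_contarClasesPorValorDeAtributo; infer_instance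

-- ===== CLAIM (what is proved, stated in full; the proofs are below) =====
def Claim_equal_contarClasesPorValorDeAtributo : Prop := ∀ (datos : List (List (String × String))), Dom_contarClasesPorValorDeAtributo datos → Pre_contarClasesPorValorDeAtributo datos → Spec_contarClasesPorValorDeAtributo datos (contarClasesPorValorDeAtributo datos)

-- ===== LEMMAS AND PROOFS =====

-- B's setdefault/get increment step equals A's three-way-branch step pvF.
lemma pvStepB_eq_pvF (attr : String) (row : List (String × String)) (m : PySem.Dict String (PySem.Dict String Int)) :
    (let v := (PySem.Dict.mk row).getD attr ""
     let c := (PySem.Dict.mk row).getD "class" ""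
     let counts := if m.contains v = false then m.insert v PySem.Dict.empty else m
     let inner := counts.getD v PySem.Dict.empty
     counts.insert v (inner.insert c (inner.getD c 0 + 1))) = pvF attr row m := by
  simp only [pvF]
  set v := (PySem.Dict.mk row).getD attr ""
  set c := (PySem.Dict.mk row).getD "class" ""
  by_cases hv : m.contains v = false
  · simp [hv, PySem.Dict.getD_insert_self, PySem.Dict.insert_insert_self]
  · simp only [hv]
    simp only [Bool.not_eq_false] at hv
    by_cases hc : (m.getD v PySem.Dict.empty).contains c
    · simp [hc]
    · simp only [Bool.not_eq_true] at hc
      simp [hc, PySem.Dict.getD_of_not_contains _ _ hc]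

lemma pvMap_ite_fst_eq_self {ν : Type} (l : List (String × ν)) (a : String) (v : String × ν)
    (h : ∀ p ∈ l, p.1 ≠ a) :
    l.map (fun p => if (p.1 == a) = true then v else p) = l := by
  induction l with
  | nil => simp
  | cons x t ih =>
    simp only [List.map_cons, List.cons.injEq]
    constructor
    · have := h x (by simp)
      simp [beq_iff_eq, this]
    · exact ih (fun p hp => h p (by simp [hp]))

-- A's inner loop over the keys updates every entry of the association list independently.
lemma pvStepA_par (row : List (String × String)) (Q P : List (String × PySem.Dict String (PySem.Dict String Int)))
    (h : ((P ++ Q).map Prod.fst).Nodup) :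
    (Q.map Prod.fst).foldl
        (fun acc attr => acc.insert attr (pvF attr row (acc.getD attr PySem.Dict.empty)))
        (PySem.Dict.mk (P ++ Q))
      = PySem.Dict.mk (P ++ Q.map (fun p => (p.1, pvF p.1 row p.2))) := by
  induction Q generalizing P with
  | nil => simp
  | cons q Q' ih =>
    obtain ⟨a, m⟩ := q
    simp only [List.map_cons, List.foldl_cons]
    have hkeys : (PySem.Dict.mk (P ++ (a, m) :: Q')).keys.Nodup := by
      simpa [PySem.Dict.keys_mk] using h
    have hmem : ((a, m) : String × PySem.Dict String (PySem.Dict String Int)) ∈ (PySem.Dict.mk (P ++ (a, m) :: Q')).items := by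
      simp
    have hget : (PySem.Dict.mk (P ++ (a, m) :: Q')).getD a PySem.Dict.empty = m :=
      PySem.Dict.getD_of_mem_items _ hmem hkeys _
    have hcont : (PySem.Dict.mk (P ++ (a, m) :: Q')).contains a = true := by
      rw [PySem.Dict.contains_iff_mem_keys]
      simp [PySem.Dict.keys_mk]
    have hmid : (a :: (P.map Prod.fst ++ Q'.map Prod.fst)).Nodup := by
      rw [← List.nodup_middle]
      simpa using h
    have hnotin : a ∉ P.map Prod.fst ++ Q'.map Prod.fst := (List.nodup_cons.mp hmid).1
    have hPa : ∀ p ∈ P, p.1 ≠ a := by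
      intro p hp he
      exact hnotin (by rw [← he]; exact List.mem_append_left _ (List.mem_map_of_mem hp))
    have hQa : ∀ p ∈ Q', p.1 ≠ a := by
      intro p hp he
      exact hnotin (by rw [← he]; exact List.mem_append_right _ (List.mem_map_of_mem hp))
    have hins : (PySem.Dict.mk (P ++ (a, m) :: Q')).insert a (pvF a row m)
        = PySem.Dict.mk ((P ++ [(a, pvF a row m)]) ++ Q') := by
      apply PySem.Dict.ext
      rw [PySem.Dict.items_insert_of_contains _ _ hcont]
      show (P ++ (a, m) :: Q').map _ = _
      rw [List.map_append, List.map_cons]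
      rw [pvMap_ite_fst_eq_self P a _ hPa, pvMap_ite_fst_eq_self Q' a _ hQa]
      simp
    rw [hget, hins]
    have hnd' : (((P ++ [(a, pvF a row m)]) ++ Q').map Prod.fst).Nodup := by
      simp only [List.map_append, List.map_cons, List.append_assoc, List.singleton_append]
      rw [List.nodup_middle]
      simpa using hmid
    rw [ih (P ++ [(a, pvF a row m)]) hnd']
    simp

-- initialization from a duplicate-free row builds exactly the attribute skeleton
lemma pvInitA_empty (row : List (String × String)) (hnd : (row.map Prod.fst).Nodup) :
    pvInitA PySem.Dict.empty row
      = PySem.Dict.mk ((row.filter (fun kv => kv.1 != "class")).map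
          (fun kv => (kv.1, (PySem.Dict.empty : PySem.Dict String (PySem.Dict String Int))))) := by
  unfold pvInitA
  rw [PySem.List.foldl_if_eq_foldl_filter]
  apply PySem.Dict.ext
  have hsub : ((row.filter (fun kv => kv.1 != "class")).map Prod.fst).Nodup :=
    hnd.sublist (List.Sublist.map Prod.fst (List.filter_sublist (l := row)))
  rw [PySem.Dict.items_foldl_insert_fresh _ Prod.fst (fun _ => PySem.Dict.empty) _ (by intro a _; simp) hsub]
  simp [PySem.Dict.empty]

-- running A's loop over rows from a full skeleton is an independent fold per attribute
lemma pvRunA (attrs : List String) (hne : attrs ≠ []) (hnd : attrs.Nodup)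
    (g : String → PySem.Dict String (PySem.Dict String Int)) (rows : List (List (String × String))) :
    rows.foldl (fun acc row => pvStepA (if acc.items.isEmpty then pvInitA acc row else acc) row)
        (PySem.Dict.mk (attrs.map (fun a => (a, g a))))
      = PySem.Dict.mk (attrs.map (fun a => (a, rows.foldl (fun m row => pvF a row m) (g a)))) := by
  induction rows generalizing g with
  | nil => simp
  | cons row rs ih =>
    rw [List.foldl_cons]
    have hempty : (PySem.Dict.mk (attrs.map (fun a => (a, g a)))).items.isEmpty = false := by
      cases attrs with
      | nil => exact absurd rfl hne
      | cons b t => simp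
    rw [hempty]
    simp only [Bool.false_eq_true, if_false]
    have hstep : pvStepA (PySem.Dict.mk (attrs.map (fun a => (a, g a)))) row
        = PySem.Dict.mk (attrs.map (fun a => (a, pvF a row (g a)))) := by
      unfold pvStepA
      rw [PySem.Dict.keys_mk]
      have hk : List.map (fun x : String × PySem.Dict String (PySem.Dict String Int) => x.1)
          (attrs.map (fun a => (a, g a))) = attrs := by
        rw [List.map_map]; simp [Function.comp_def]
      rw [hk]
      have := pvStepA_par row (attrs.map (fun a => (a, g a))) []
        (by rw [List.nil_append]; simpa [Function.comp_def] using hnd)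
      simp only [List.nil_append] at this
      rw [show List.map Prod.fst (attrs.map (fun a => (a, g a))) = attrs by
        rw [List.map_map]; simp [Function.comp_def]] at this
      rw [this, List.map_map]
      simp [Function.comp_def]
    rw [hstep, ih (fun a => pvF a row (g a))]
    simp

-- B's setdefault-based counting pass is the fold of A's step pvF
lemma pvCountB_eq_foldF (attr : String) (rows : List (List (String × String))) :
    pvCountB attr rows = rows.foldl (fun m row => pvF attr row m) PySem.Dict.empty := by
  unfold pvCountB
  exact PySem.List.foldl_congr_mem _ _ _ _ (fun acc x _ => pvStepB_eq_pvF attr x acc)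

-- B's outer loop with its 'continue' is the fold over the filtered key list
lemma pvFoldSkip (ds : List (List (String × String))) (ks : List String)
    (res : PySem.Dict String (PySem.Dict String (PySem.Dict String Int))) :
    ks.foldl (fun res attr => if attr == "class" then res else res.insert attr (pvCountB attr ds)) res
      = (ks.filter (fun k => k != "class")).foldl
          (fun res attr => res.insert attr (pvCountB attr ds)) res := by
  induction ks generalizing res with
  | nil => rfl
  | cons k t ih =>
    rw [List.foldl_cons, List.filter_cons]
    cases h : (k == "class") with
    | true =>
      simp only [h, if_true, bne, Bool.not_true, Bool.false_eq_true, if_false]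
      exact ih res
    | false =>
      simp only [h, Bool.false_eq_true, if_false, bne, Bool.not_false, if_true, List.foldl_cons]
      exact ih _

lemma pvSoloClase_filter_nil (row : List (String × String)) (h : pvSoloClase row = true) :
    row.filter (fun kv => kv.1 != "class") = [] := by
  simp only [pvSoloClase, List.all_eq_true, beq_iff_eq] at h
  simp only [List.filter_eq_nil_iff, bne_iff_ne, ne_eq, Decidable.not_not]
  exact h

lemma pvFilterMapFst (row : List (String × String)) :
    (row.map Prod.fst).filter (fun k => k != "class")
      = (row.filter (fun kv => kv.1 != "class")).map Prod.fst := by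
  rw [List.filter_map]
  rfl

-- A's accumulator stays empty over attribute-free rows
lemma pvRunA_solo (rows : List (List (String × String))) (h : ∀ r ∈ rows, pvSoloClase r = true) :
    rows.foldl (fun acc row => pvStepA (if acc.items.isEmpty then pvInitA acc row else acc) row)
        (PySem.Dict.empty : PySem.Dict String (PySem.Dict String (PySem.Dict String Int)))
      = PySem.Dict.empty := by
  induction rows with
  | nil => rfl
  | cons row rs ih =>
    rw [List.foldl_cons]
    have hinit : pvInitA (PySem.Dict.empty : PySem.Dict String (PySem.Dict String (PySem.Dict String Int))) row
        = PySem.Dict.empty := by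
      unfold pvInitA
      rw [PySem.List.foldl_if_eq_foldl_filter, pvSoloClase_filter_nil row (h row List.mem_cons_self)]
      rfl
    rw [if_pos (show (PySem.Dict.empty : PySem.Dict String (PySem.Dict String (PySem.Dict String Int))).items.isEmpty = true from rfl), hinit]
    rw [show pvStepA PySem.Dict.empty row = PySem.Dict.empty from rfl]
    exact ih (fun r hr => h r (List.mem_cons_of_mem _ hr))

lemma pvMain (datos : List (List (String × String))) (hpre : Pre_contarClasesPorValorDeAtributo datos) :
    contarClasesPorValorDeAtributo datos = contarClasesPorValorDeAtributo_alt datos := by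
  obtain ⟨hnd, hcase⟩ := hpre
  cases datos with
  | nil => rfl
  | cons row rest =>
    cases hcase with
    | inl hsolo =>
      -- every row carries only 'class': both sides return the empty dict
      have hA : contarClasesPorValorDeAtributo (row :: rest) = [] := by
        unfold contarClasesPorValorDeAtributo
        rw [pvRunA_solo _ hsolo]
        rfl
      have hkeys : (PySem.Dict.mk row).keys.filter (fun k => k != "class") = [] := by
        rw [PySem.Dict.keys_mk, pvFilterMapFst, pvSoloClase_filter_nil row (hsolo row List.mem_cons_self)]
        rfl
      have hB : contarClasesPorValorDeAtributo_alt (row :: rest) = [] := by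
        simp only [contarClasesPorValorDeAtributo_alt]
        rw [pvFoldSkip, hkeys]
        rfl
      rw [hA, hB]
    | inr hattr =>
      obtain ⟨hhead, hkeys⟩ := hattr
      have hsolo : pvSoloClase row = false := by simpa using hhead
      have hndrow : (row.map Prod.fst).Nodup := hnd row List.mem_cons_self
      have hndattrs : ((row.filter (fun kv => kv.1 != "class")).map Prod.fst).Nodup :=
        hndrow.sublist (List.Sublist.map Prod.fst (List.filter_sublist (l := row)))
      set attrs := (row.filter (fun kv => kv.1 != "class")).map Prod.fst with hattrs_def
      have hne : attrs ≠ [] := by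
        intro hnil
        have : row.filter (fun kv => kv.1 != "class") = [] := List.map_eq_nil_iff.mp hnil
        simp only [List.filter_eq_nil_iff, bne_iff_ne, ne_eq, Decidable.not_not] at this
        have : pvSoloClase row = true := by
          simp only [pvSoloClase, List.all_eq_true, beq_iff_eq]
          exact this
        rw [this] at hsolo
        exact absurd hsolo (by simp)
      have hskel_ne : (PySem.Dict.mk (attrs.map (fun a =>
          (a, (PySem.Dict.empty : PySem.Dict String (PySem.Dict String Int)))))).items.isEmpty = false := by
        cases h : attrs with
        | nil => exact absurd h hne
        | cons b t => simp
      have h1 := pvRunA attrs hne hndattrs (fun _ => PySem.Dict.empty) [row]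
      simp only [List.foldl_cons, List.foldl_nil, hskel_ne, Bool.false_eq_true, if_false] at h1
      have hmapskel : (row.filter (fun kv => kv.1 != "class")).map
            (fun kv => (kv.1, (PySem.Dict.empty : PySem.Dict String (PySem.Dict String Int))))
          = attrs.map (fun a => (a, PySem.Dict.empty)) := by
        rw [hattrs_def, List.map_map]
        rfl
      have hAdict : (row :: rest).foldl
            (fun acc r => pvStepA (if acc.items.isEmpty then pvInitA acc r else acc) r) PySem.Dict.empty
          = PySem.Dict.mk (attrs.map (fun a =>
              (a, rest.foldl (fun m r => pvF a r m) (pvF a row PySem.Dict.empty)))) := by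
        rw [List.foldl_cons, if_pos (show (PySem.Dict.empty : PySem.Dict String (PySem.Dict String (PySem.Dict String Int))).items.isEmpty = true from rfl), pvInitA_empty row hndrow, hmapskel, h1]
        exact pvRunA attrs hne hndattrs (fun a => pvF a row PySem.Dict.empty) rest
      have hBdict : attrs.foldl
            (fun res attr => res.insert attr (pvCountB attr (row :: rest))) PySem.Dict.empty
          = PySem.Dict.mk (attrs.map (fun a => (a, pvCountB a (row :: rest)))) := by
        apply PySem.Dict.ext
        rw [PySem.Dict.items_foldl_insert_fresh _ (fun a => a) (fun a => pvCountB a (row :: rest)) _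
          (by intro a _; simp) (by simpa using hndattrs)]
        simp [PySem.Dict.empty]
      unfold contarClasesPorValorDeAtributo
      simp only [contarClasesPorValorDeAtributo_alt]
      rw [hAdict, pvFoldSkip, PySem.Dict.keys_mk, pvFilterMapFst, ← hattrs_def, hBdict]
      have hcnt : ∀ a, pvCountB a (row :: rest)
          = rest.foldl (fun m r => pvF a r m) (pvF a row PySem.Dict.empty) := by
        intro a
        rw [pvCountB_eq_foldF, List.foldl_cons]
      simp only [hcnt]

-- ===== VERDICT (by name: the statement is the Claim_ definition above) =====
theorem contarClasesPorValorDeAtributo_spec : Claim_equal_contarClasesPorValorDeAtributo := by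
  intro datos _ hpre
  unfold Spec_contarClasesPorValorDeAtributo
  exact pvMain datos hpre
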